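-- pv_equiv track=rewrite | github.com/Udodov/Homework_Immersion_in_Python_7 | Homework_Immersion_in_Python_7/task_hwIP_6_3b.py | find_attacking_pairs
-- ===== SOURCE A (Python) =====
-- from typing import List, Tuple
--
-- BOARD_SIZE = 8  # Размер шахматной доски
--
-- def find_attacking_pairs(queens: List[int]) -> List[Tuple[Tuple[int, int], Tuple[int, int]]]:
--     """
--     Находит пары бьющих друг друга ферзей.
--     """
--     pairs = []  # Используем уникальное имя для избежания затенения
--     for col1 in range(BOARD_SIZE):
--         for col2 in range(col1 + 1, BOARD_SIZE):
--             row1 = queens[col1]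
--             row2 = queens[col2]
--             if row1 == row2 or \
--                     abs(row1 - row2) == abs(col1 - col2):
--                 pairs.append(((col1, row1), (col2, row2)))
--     return pairs
-- ===== SOURCE B (Python) =====
-- BOARD_SIZE = 8  # board size, as in A
--
-- def _build_groups(queens):
--     """Index the first 8 columns by row, diagonal and anti-diagonal key."""
--     rows, diags, antis = {}, {}, {}
--     for col in range(BOARD_SIZE):
--         row = queens[col]
--         rows.setdefault(row, []).append(col)
--         diags.setdefault(col - row, []).append(col)
--         antis.setdefault(col + row, []).append(col)
--     return rows, diags, antis
--
-- def find_attacking_pairs(queens):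
--     rows, diags, antis = _build_groups(queens)
--     result = []
--     for col in range(BOARD_SIZE):
--         row = queens[col]
--         partners = [c for c in rows[row] + diags[col - row] + antis[col + row]
--                     if c > col]
--         for c in sorted(partners):
--             result.append(((col, row), (c, queens[c])))
--     return result
-- ===== Notes on version B (the rewrite author's own statement) =====
-- stated objective: alternative
-- what changed: A tests all 28 column pairs with an O(1)-per-pair attack check inside nested loops; B instead builds three dicts indexing columns by row, diagonal and anti-diagonal key in one pass, then reads each column's attackers straight out of its three groups (sorting the small partner list to keep A's output order).
import Mathlib
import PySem

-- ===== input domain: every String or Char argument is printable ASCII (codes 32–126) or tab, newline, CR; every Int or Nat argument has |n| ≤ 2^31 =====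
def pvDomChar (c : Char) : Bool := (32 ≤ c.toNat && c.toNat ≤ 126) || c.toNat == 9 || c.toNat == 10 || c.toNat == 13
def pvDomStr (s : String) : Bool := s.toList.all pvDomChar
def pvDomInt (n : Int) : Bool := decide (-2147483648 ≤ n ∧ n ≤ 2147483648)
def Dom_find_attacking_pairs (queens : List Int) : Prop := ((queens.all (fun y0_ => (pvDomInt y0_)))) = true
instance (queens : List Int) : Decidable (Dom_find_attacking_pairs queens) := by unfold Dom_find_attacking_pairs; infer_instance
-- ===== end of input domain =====

-- B replaces A's 28 pairwise tests by three hash-map group indexes (row / diagonal / anti-diagonal)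
-- and emits each column's partners from its three groups; same return value, objective: alternative.

-- ===== PORT A =====
-- literal port of A's nested loops; queens[col] is pyGetD, exact under Pre_ (8 ≤ length)
def find_attacking_pairs (queens : List Int) : List ((Int × Int) × (Int × Int)) :=
  (PySem.List.pyRange 0 8 1).foldl
    (fun pairs col1 =>
      (PySem.List.pyRange (col1 + 1) 8 1).foldl
        (fun pairs col2 =>
          let row1 := PySem.List.pyGetD queens col1 0
          let row2 := PySem.List.pyGetD queens col2 0
          if row1 = row2 ∨ |row1 - row2| = |col1 - col2| then
            pairs ++ [((col1, row1), (col2, row2))]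
          else pairs)
        pairs)
    []

-- ===== PORT B =====
-- port of Source B's _build_groups: one pass over columns 0..7 filling the three dicts
def pvBuildGroups (queens : List Int) :
    PySem.Dict Int (List Int) × PySem.Dict Int (List Int) × PySem.Dict Int (List Int) :=
  (PySem.List.pyRange 0 8 1).foldl
    (fun st col =>
      let row := PySem.List.pyGetD queens col 0
      (st.1.insert row (st.1.getD row [] ++ [col]),
       st.2.1.insert (col - row) (st.2.1.getD (col - row) [] ++ [col]),
       st.2.2.insert (col + row) (st.2.2.getD (col + row) [] ++ [col])))
    (PySem.Dict.empty, PySem.Dict.empty, PySem.Dict.empty)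

-- Source B's main loop; rows[row] etc. are keyed lookups that always hit (col is in its own groups),
-- so getD [] computes exactly Python's d[k] here
def find_attacking_pairs_alt (queens : List Int) : List ((Int × Int) × (Int × Int)) :=
  let g := pvBuildGroups queens
  (PySem.List.pyRange 0 8 1).foldl
    (fun res col =>
      let row := PySem.List.pyGetD queens col 0
      let partners :=
        (g.1.getD row [] ++ g.2.1.getD (col - row) [] ++ g.2.2.getD (col + row) []).filter
          (fun c => decide (col < c))
      (PySem.List.sorted partners (fun c => c) false).foldl
        (fun res c => res ++ [((col, row), (c, PySem.List.pyGetD queens c 0))]) res)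
    []

-- ===== PRECONDITION & SPEC =====
-- A indexes queens[0..7]; on shorter lists Python raises IndexError, excluded here.
def Pre_find_attacking_pairs (queens : List Int) : Prop := 8 ≤ queens.length
instance (queens : List Int) : Decidable (Pre_find_attacking_pairs queens) := by
  unfold Pre_find_attacking_pairs; infer_instance

def pvWitness_find_attacking_pairs : List Int := [0, 4, 7, 5, 2, 6, 1, 3]

def Spec_find_attacking_pairs (queens : List Int) (out : List ((Int × Int) × (Int × Int))) : Prop := out = find_attacking_pairs_alt queens
instance (queens : List Int) (out : List ((Int × Int) × (Int × Int))) : Decidable (Spec_find_attacking_pairs queens out) := by unfold Spec_find_attacking_pairs; infer_instance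

-- ===== CLAIM (what is proved, stated in full; the proofs are below) =====
def Claim_equal_find_attacking_pairs : Prop := ∀ (queens : List Int), Dom_find_attacking_pairs queens → Pre_find_attacking_pairs queens → Spec_find_attacking_pairs queens (find_attacking_pairs queens)

-- ===== LEMMAS AND PROOFS =====

-- the group-building fold, component by component: each dict maps a key to the
-- (ascending) list of processed columns having that key
theorem pvBuildGroups_aux (queens cs : List Int)
    (st : PySem.Dict Int (List Int) × PySem.Dict Int (List Int) × PySem.Dict Int (List Int)) :
    (∀ k, (cs.foldl
      (fun st col =>
        let row := PySem.List.pyGetD queens col 0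
        (st.1.insert row (st.1.getD row [] ++ [col]),
         st.2.1.insert (col - row) (st.2.1.getD (col - row) [] ++ [col]),
         st.2.2.insert (col + row) (st.2.2.getD (col + row) [] ++ [col]))) st).1.getD k []
      = st.1.getD k [] ++ cs.filter (fun c => decide (PySem.List.pyGetD queens c 0 = k))) ∧
    (∀ k, (cs.foldl
      (fun st col =>
        let row := PySem.List.pyGetD queens col 0
        (st.1.insert row (st.1.getD row [] ++ [col]),
         st.2.1.insert (col - row) (st.2.1.getD (col - row) [] ++ [col]),
         st.2.2.insert (col + row) (st.2.2.getD (col + row) [] ++ [col]))) st).2.1.getD k []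
      = st.2.1.getD k [] ++ cs.filter (fun c => decide (c - PySem.List.pyGetD queens c 0 = k))) ∧
    (∀ k, (cs.foldl
      (fun st col =>
        let row := PySem.List.pyGetD queens col 0
        (st.1.insert row (st.1.getD row [] ++ [col]),
         st.2.1.insert (col - row) (st.2.1.getD (col - row) [] ++ [col]),
         st.2.2.insert (col + row) (st.2.2.getD (col + row) [] ++ [col]))) st).2.2.getD k []
      = st.2.2.getD k [] ++ cs.filter (fun c => decide (c + PySem.List.pyGetD queens c 0 = k))) := by
  induction cs generalizing st with
  | nil => simp
  | cons c cs ih =>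
    obtain ⟨ih1, ih2, ih3⟩ := ih ((fun st col =>
      let row := PySem.List.pyGetD queens col 0
      (st.1.insert row (st.1.getD row [] ++ [col]),
       st.2.1.insert (col - row) (st.2.1.getD (col - row) [] ++ [col]),
       st.2.2.insert (col + row) (st.2.2.getD (col + row) [] ++ [col]))) st c)
    refine ⟨fun k => ?_, fun k => ?_, fun k => ?_⟩
    · simp only [List.foldl_cons, ih1, PySem.Dict.getD_insert, List.filter_cons]
      by_cases h : PySem.List.pyGetD queens c 0 = k
      · subst h; simp
      · rw [if_neg (fun hh => h hh.symm)]; simp [h]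
    · simp only [List.foldl_cons, ih2, PySem.Dict.getD_insert, List.filter_cons]
      by_cases h : c - PySem.List.pyGetD queens c 0 = k
      · subst h; simp
      · rw [if_neg (fun hh => h hh.symm)]; simp [h]
    · simp only [List.foldl_cons, ih3, PySem.Dict.getD_insert, List.filter_cons]
      by_cases h : c + PySem.List.pyGetD queens c 0 = k
      · subst h; simp
      · rw [if_neg (fun hh => h hh.symm)]; simp [h]

theorem pvGroups_rows (queens : List Int) (k : Int) :
    (pvBuildGroups queens).1.getD k []
      = (PySem.List.pyRange 0 8 1).filter (fun c => decide (PySem.List.pyGetD queens c 0 = k)) := by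
  have h := (pvBuildGroups_aux queens (PySem.List.pyRange 0 8 1)
    (PySem.Dict.empty, PySem.Dict.empty, PySem.Dict.empty)).1 k
  simpa [pvBuildGroups] using h

theorem pvGroups_diags (queens : List Int) (k : Int) :
    (pvBuildGroups queens).2.1.getD k []
      = (PySem.List.pyRange 0 8 1).filter (fun c => decide (c - PySem.List.pyGetD queens c 0 = k)) := by
  have h := (pvBuildGroups_aux queens (PySem.List.pyRange 0 8 1)
    (PySem.Dict.empty, PySem.Dict.empty, PySem.Dict.empty)).2.1 k
  simpa [pvBuildGroups] using h

theorem pvGroups_antis (queens : List Int) (k : Int) :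
    (pvBuildGroups queens).2.2.getD k []
      = (PySem.List.pyRange 0 8 1).filter (fun c => decide (c + PySem.List.pyGetD queens c 0 = k)) := by
  have h := (pvBuildGroups_aux queens (PySem.List.pyRange 0 8 1)
    (PySem.Dict.empty, PySem.Dict.empty, PySem.Dict.empty)).2.2 k
  simpa [pvBuildGroups] using h

-- per-column: the sorted partner list is exactly A's filtered inner range
theorem pv_percol (queens : List Int) (col : Int) (h0 : 0 ≤ col) (h8 : col < 8) :
    PySem.List.sorted
      (((pvBuildGroups queens).1.getD (PySem.List.pyGetD queens col 0) []
        ++ (pvBuildGroups queens).2.1.getD (col - PySem.List.pyGetD queens col 0) []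
        ++ (pvBuildGroups queens).2.2.getD (col + PySem.List.pyGetD queens col 0) []).filter
          (fun c => decide (col < c)))
      (fun c => c) false
    = (PySem.List.pyRange (col + 1) 8 1).filter
        (fun col2 => decide (PySem.List.pyGetD queens col 0 = PySem.List.pyGetD queens col2 0 ∨
          |PySem.List.pyGetD queens col 0 - PySem.List.pyGetD queens col2 0| = |col - col2|)) := by
  have habs : ∀ c : Int, col < c →
      (|PySem.List.pyGetD queens col 0 - PySem.List.pyGetD queens c 0| = |col - c| ↔
        (c - PySem.List.pyGetD queens c 0 = col - PySem.List.pyGetD queens col 0 ∨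
         c + PySem.List.pyGetD queens c 0 = col + PySem.List.pyGetD queens col 0)) := by
    intro c hlt
    rw [abs_sub_comm col c, abs_of_nonneg (by omega : (0:Int) ≤ c - col),
      abs_eq (by omega : (0:Int) ≤ c - col)]
    omega
  rw [pvGroups_rows, pvGroups_diags, pvGroups_antis, List.filter_append, List.filter_append]
  apply PySem.List.sorted_eq_of_perm_of_pairwise_lt
  · -- permutation: both sides are nodup with identical membership
    rw [List.perm_ext_iff_of_nodup]
    · intro c
      simp only [List.mem_filter, List.mem_append, PySem.List.mem_pyRange_one,
        decide_eq_true_eq]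
      by_cases hlt : col < c
      · rw [habs c hlt]
        constructor
        · rintro ⟨⟨h1, h2⟩, hk | hk⟩
          · exact Or.inl (Or.inl ⟨⟨⟨by omega, h2⟩, hk.symm⟩, hlt⟩)
          · rcases hk with hk | hk
            · exact Or.inl (Or.inr ⟨⟨⟨by omega, h2⟩, hk⟩, hlt⟩)
            · exact Or.inr ⟨⟨⟨by omega, h2⟩, hk⟩, hlt⟩
        · rintro ((⟨⟨⟨h1, h2⟩, hk⟩, -⟩ | ⟨⟨⟨h1, h2⟩, hk⟩, -⟩) | ⟨⟨⟨h1, h2⟩, hk⟩, -⟩)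
          · exact ⟨⟨by omega, h2⟩, Or.inl hk.symm⟩
          · exact ⟨⟨by omega, h2⟩, Or.inr (Or.inl hk)⟩
          · exact ⟨⟨by omega, h2⟩, Or.inr (Or.inr hk)⟩
      · constructor
        · intro h
          have := h.1.1
          exact absurd (by omega : col < c) hlt
        · rintro ((h | h) | h) <;> exact absurd h.2 hlt
    · -- A's filtered range is nodup
      exact (PySem.List.nodup_pyRange_one _ _).filter _
    · -- partners are nodup: three nodup lists, pairwise disjoint below a queen's own column
      rw [List.nodup_append, List.nodup_append]
      refine ⟨⟨((PySem.List.nodup_pyRange_one _ _).filter _).filter _,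
        ((PySem.List.nodup_pyRange_one _ _).filter _).filter _, ?_⟩,
        ((PySem.List.nodup_pyRange_one _ _).filter _).filter _, ?_⟩
      · intro a ha b hb
        simp only [List.mem_filter, PySem.List.mem_pyRange_one, decide_eq_true_eq] at ha hb
        rintro rfl; omega
      · intro a ha b hb
        rcases List.mem_append.mp ha with h | h <;>
          · simp only [List.mem_filter, PySem.List.mem_pyRange_one, decide_eq_true_eq] at h hb
            rintro rfl; omega
  · -- A's filtered range is strictly increasing
    exact (PySem.List.pairwise_lt_pyRange_one _ _).filter _

-- ===== VERDICT (by name: the statement is the Claim_ definition above) =====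
theorem find_attacking_pairs_spec : Claim_equal_find_attacking_pairs := by
  intro queens _ _
  unfold Spec_find_attacking_pairs find_attacking_pairs find_attacking_pairs_alt
  apply PySem.List.foldl_congr_mem'
  intro col hcol acc
  have hm := PySem.List.mem_pyRange_one.mp hcol
  rw [PySem.List.foldl_append_ite
    (fun col2 => PySem.List.pyGetD queens col 0 = PySem.List.pyGetD queens col2 0 ∨
      |PySem.List.pyGetD queens col 0 - PySem.List.pyGetD queens col2 0| = |col - col2|)
    (fun col2 => ((col, PySem.List.pyGetD queens col 0), (col2, PySem.List.pyGetD queens col2 0))),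
    PySem.List.foldl_append_singleton_eq_map, pv_percol queens col hm.1 hm.2]
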